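-- pv_equiv track=rewrite | github.com/Ch-Hyuk/Algorithm-Study | 프로그래머스/2024 카카오 인턴/test3.py | wining_case
-- ===== SOURCE A (Python) =====
-- from collections import Counter
--
-- def wining_case(a_dice, b_dice):
--     cnt = 0
--     A_cnt = Counter(a_dice)
--     B_cnt = Counter(b_dice)
--
--     for a_key, a_value in A_cnt.items():
--         for b_key, b_value in B_cnt.items():
--             if a_key > b_key:
--                 cnt += a_value * b_value
--
--     return cnt
-- ===== SOURCE B (Python) =====
-- def wining_case(a_dice, b_dice):
--     sa = sorted(a_dice)
--     sb = sorted(b_dice)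
--     cnt = 0
--     j = 0
--     for a in sa:
--         while j < len(sb) and sb[j] < a:
--             j += 1
--         cnt += j
--     return cnt
-- ===== Notes on version B (the rewrite author's own statement) =====
-- stated objective: faster
-- what changed: Replaced the Counter-of-both-lists nested loop over key pairs by sorting both lists once and doing a single two-pointer sweep: for each a (ascending) the pointer j advances monotonically to the number of b-values below a.
import Mathlib
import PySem

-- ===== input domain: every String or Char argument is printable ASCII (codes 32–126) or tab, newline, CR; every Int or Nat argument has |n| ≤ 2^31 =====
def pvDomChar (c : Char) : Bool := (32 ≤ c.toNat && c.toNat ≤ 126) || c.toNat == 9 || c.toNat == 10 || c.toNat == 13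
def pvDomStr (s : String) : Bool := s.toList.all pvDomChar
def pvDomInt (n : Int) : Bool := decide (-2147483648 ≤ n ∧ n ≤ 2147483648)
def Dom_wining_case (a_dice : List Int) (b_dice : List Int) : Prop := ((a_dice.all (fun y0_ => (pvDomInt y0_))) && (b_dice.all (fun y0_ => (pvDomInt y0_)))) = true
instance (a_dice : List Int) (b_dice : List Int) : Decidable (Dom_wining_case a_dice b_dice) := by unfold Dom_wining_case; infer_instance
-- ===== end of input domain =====

-- B replaces A's nested loop over two Counters by sorting both lists and one
-- two-pointer sweep (objective: faster, asymptotic).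

-- ===== PORT A =====
-- literal transliteration: cnt = 0; Counter(a); Counter(b); nested loop over items
def wining_case (a_dice : List Int) (b_dice : List Int) : Int :=
  let cnt : Int := 0
  let A_cnt := PySem.Dict.counter a_dice
  let B_cnt := PySem.Dict.counter b_dice
  A_cnt.items.foldl (fun cnt p =>
    B_cnt.items.foldl (fun cnt q =>
      if p.1 > q.1 then cnt + p.2 * q.2 else cnt) cnt) cnt

-- ===== PORT B =====
-- the inner `while j < len(sb) and sb[j] < a: j += 1` of Source B
def wcAdvance (sb : List Int) (a : Int) (j : Nat) : Nat :=
  if h : j < sb.length then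
    if sb[j] < a then wcAdvance sb a (j + 1) else j
  else j
termination_by sb.length - j

def wining_case_alt (a_dice : List Int) (b_dice : List Int) : Int :=
  let sa := PySem.List.sorted a_dice (fun x => x) false
  let sb := PySem.List.sorted b_dice (fun x => x) false
  (sa.foldl (fun (st : Int × Nat) a =>
      let j := wcAdvance sb a st.2
      (st.1 + (j : Int), j)) ((0 : Int), (0 : Nat))).1

-- ===== PRECONDITION & SPEC =====
def Spec_wining_case (a_dice : List Int) (b_dice : List Int) (out : Int) : Prop := out = wining_case_alt a_dice b_dice
instance (a_dice : List Int) (b_dice : List Int) (out : Int) : Decidable (Spec_wining_case a_dice b_dice out) := by unfold Spec_wining_case; infer_instance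

-- ===== CLAIM (what is proved, stated in full; the proofs are below) =====
def Claim_equal_wining_case : Prop := ∀ (a_dice : List Int) (b_dice : List Int), Dom_wining_case a_dice b_dice → Spec_wining_case a_dice b_dice (wining_case a_dice b_dice)

-- ===== LEMMAS AND PROOFS =====

-- canonical form both sides are reduced to
def wcCanon (a_dice : List Int) (b_dice : List Int) : Int :=
  (a_dice.map (fun a => ((b_dice.countP (fun b => decide (b < a)) : Nat) : Int))).sum

-- Σ_{k∈S} (if k = x then f k else 0) = f x, for S nodup containing x
theorem wc_sum_single (S : List Int) (hS : S.Nodup) (x : Int) (hx : x ∈ S) (f : Int → Int) :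
    (S.map (fun k => if k = x then f k else 0)).sum = f x := by
  induction S with
  | nil => cases hx
  | cons s t ih =>
    rcases List.mem_cons.1 hx with h | h
    · subst h
      have : (t.map (fun k => if k = x then f k else 0)).sum = 0 := by
        apply List.sum_eq_zero
        intro y hy
        rcases List.mem_map.1 hy with ⟨k, hk, rfl⟩
        have : k ≠ x := fun e => (List.nodup_cons.1 hS).1 (e ▸ hk)
        simp [this]
      simp [this]
    · have hxs : x ≠ s := fun e => (List.nodup_cons.1 hS).1 (e ▸ h)
      simp [Ne.symm hxs, ih (List.nodup_cons.1 hS).2 h]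

-- Σ_{k∈S} count(k,xs) * f k = Σ_{x∈xs} f x, for S nodup covering xs
theorem wc_sum_count_mul (S : List Int) (hS : S.Nodup) (xs : List Int)
    (hcov : ∀ x ∈ xs, x ∈ S) (f : Int → Int) :
    (S.map (fun k => ((xs.count k : Nat) : Int) * f k)).sum = (xs.map f).sum := by
  induction xs with
  | nil => simp
  | cons x t ih =>
    have h1 : ∀ k : Int, (((x :: t).count k : Nat) : Int) * f k
        = ((t.count k : Nat) : Int) * f k + (if k = x then f k else 0) := by
      intro k
      by_cases h : k = x
      · simp [h]; ring
      · simp [h, Ne.symm h]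
    calc (S.map (fun k => (((x :: t).count k : Nat) : Int) * f k)).sum
        = (S.map (fun k => ((t.count k : Nat) : Int) * f k
            + (if k = x then f k else 0))).sum := by
          exact congrArg List.sum (List.map_congr_left (fun k _ => h1 k))
      _ = (S.map (fun k => ((t.count k : Nat) : Int) * f k)).sum
            + (S.map (fun k => if k = x then f k else 0)).sum := by
          rw [← List.sum_map_add]
      _ = (t.map f).sum + f x := by
          rw [ih (fun y hy => hcov y (List.mem_cons_of_mem _ hy)),
              wc_sum_single S hS x (hcov x List.mem_cons_self) f]
      _ = ((x :: t).map f).sum := by simp; ring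

-- Σ_{b∈ys} (if p b then c else 0) = c * countP p ys
theorem wc_sum_ite_countP (ys : List Int) (p : Int → Prop) [DecidablePred p] (c : Int) :
    (ys.map (fun b => if p b then c else 0)).sum
      = c * ((ys.countP (fun b => decide (p b)) : Nat) : Int) := by
  induction ys with
  | nil => simp
  | cons y t ih =>
    by_cases h : p y <;> simp [h, ih, mul_add, add_comm]

-- inner Counter loop as a sum
theorem wc_inner (qs : List (Int × Int)) (ak av c : Int) :
    qs.foldl (fun cnt q => if ak > q.1 then cnt + av * q.2 else cnt) c
      = c + (qs.map (fun q => if q.1 < ak then av * q.2 else 0)).sum := by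
  have h : ∀ (acc : Int) (q : Int × Int), q ∈ qs →
      (if ak > q.1 then acc + av * q.2 else acc)
        = acc + (if q.1 < ak then av * q.2 else 0) := by
    intro acc q _
    by_cases h : q.1 < ak <;> simp [gt_iff_lt, h]
  exact (PySem.List.foldl_congr_mem _ _ _ _ h).trans
    (PySem.List.foldl_add _ (fun q : Int × Int => if q.1 < ak then av * q.2 else 0) c)

-- ===== A side =====

theorem wcA_eq_canon (a_dice b_dice : List Int) :
    wining_case a_dice b_dice = wcCanon a_dice b_dice := by
  unfold wining_case wcCanon
  simp only [PySem.Dict.items_counter]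
  have houter : ∀ (acc : Int) (p : Int × Int),
      p ∈ (PySem.Set.ofList a_dice).map (fun k => (k, (a_dice.count k : Int))) →
      (((PySem.Set.ofList b_dice).map (fun k => (k, (b_dice.count k : Int)))).foldl
        (fun cnt q => if p.1 > q.1 then cnt + p.2 * q.2 else cnt) acc)
      = acc + (a_dice.count p.1 : Int)
          * ((b_dice.countP (fun b => decide (b < p.1)) : Nat) : Int) := by
    intro acc p hp
    rcases List.mem_map.1 hp with ⟨k, _, rfl⟩
    rw [wc_inner]
    congr 1
    rw [List.map_map]
    have hcong : ∀ q ∈ PySem.Set.ofList b_dice,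
        ((fun q : Int × Int => if q.1 < k then (a_dice.count k : Int) * q.2 else 0) ∘
          (fun k' => (k', (b_dice.count k' : Int)))) q
        = ((b_dice.count q : Nat) : Int)
            * (if q < k then (a_dice.count k : Int) else 0) := by
      intro q _
      by_cases h : q < k <;> simp [Function.comp, h] <;> ring
    rw [List.map_congr_left hcong,
        wc_sum_count_mul _ (PySem.Set.nodup_ofList b_dice) b_dice
          (fun x hx => (PySem.Set.mem_ofList _ _).2 hx),
        wc_sum_ite_countP b_dice (fun b => b < k) ((a_dice.count k : Nat) : Int)]
  rw [(PySem.List.foldl_congr_mem _ _ _ _ houter).trans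
        (PySem.List.foldl_add _ (fun p : Int × Int => (a_dice.count p.1 : Int)
          * ((b_dice.countP (fun b => decide (b < p.1)) : Nat) : Int)) 0), List.map_map]
  have hcong2 : ∀ k ∈ PySem.Set.ofList a_dice,
      ((fun p : Int × Int => (a_dice.count p.1 : Int)
          * ((b_dice.countP (fun b => decide (b < p.1)) : Nat) : Int)) ∘
        (fun k' => (k', (a_dice.count k' : Int)))) k
      = ((a_dice.count k : Nat) : Int)
          * ((b_dice.countP (fun b => decide (b < k)) : Nat) : Int) := by
    intro k _; simp [Function.comp]
  rw [List.map_congr_left hcong2,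
      wc_sum_count_mul _ (PySem.Set.nodup_ofList a_dice) a_dice
        (fun x hx => (PySem.Set.mem_ofList _ _).2 hx)]
  simp

-- ===== B side =====

-- in a ≤-sorted list, the elements < a form a prefix: index vs countP
theorem wc_sorted_index (sb : List Int) (hs : sb.Pairwise (· ≤ ·)) (a : Int) :
    ∀ (i : Nat) (h : i < sb.length),
      (sb[i] < a ↔ i < sb.countP (fun b => decide (b < a))) := by
  induction sb with
  | nil => intro i h; cases h
  | cons x t ih =>
    have hx : ∀ y ∈ t, x ≤ y := fun y hy => List.rel_of_pairwise_cons hs hy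
    have ht : t.Pairwise (· ≤ ·) := (List.pairwise_cons.1 hs).2
    intro i h
    match i with
    | 0 =>
      simp only [List.getElem_cons_zero, List.countP_cons]
      constructor
      · intro hxa
        simp [hxa]
      · intro hpos
        by_contra hnot
        have h0 : t.countP (fun b => decide (b < a)) = 0 := by
          apply List.countP_eq_zero.2
          intro y hy
          simp only [decide_eq_true_eq]
          exact fun hya => hnot (lt_of_le_of_lt (hx y hy) hya)
        simp [h0, hnot] at hpos
    | Nat.succ i =>
      simp only [List.getElem_cons_succ, List.countP_cons]
      have h' : i < t.length := by simpa using h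
      by_cases hxa : x < a
      · have hone : (if decide (x < a) = true then 1 else 0) = 1 := by simp [hxa]
        rw [hone, ih ht i h']
        omega
      · have h0 : t.countP (fun b => decide (b < a)) = 0 := by
          apply List.countP_eq_zero.2
          intro y hy
          simp only [decide_eq_true_eq]
          exact fun hya => hxa (lt_of_le_of_lt (hx y hy) hya)
        have : ¬ t[i] < a :=
          fun hya => hxa (lt_of_le_of_lt (hx _ (List.getElem_mem h')) hya)
        simp [h0, hxa, this]

-- the while loop lands exactly on countP, from any start not past it
theorem wc_advance_eq (sb : List Int) (hs : sb.Pairwise (· ≤ ·)) (a : Int) (j : Nat)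
    (hj : j ≤ sb.countP (fun b => decide (b < a))) :
    wcAdvance sb a j = sb.countP (fun b => decide (b < a)) := by
  unfold wcAdvance
  by_cases h : j < sb.length
  · by_cases hlt : sb[j] < a
    · simp only [h, hlt, dif_pos, if_pos]
      have : j < sb.countP (fun b => decide (b < a)) := (wc_sorted_index sb hs a j h).1 hlt
      exact wc_advance_eq sb hs a (j + 1) this
    · simp only [h, hlt, dif_pos, if_neg, not_false_iff]
      have := (wc_sorted_index sb hs a j h).2
      omega
  · simp only [h, dif_neg, not_false_iff]
    have := List.countP_le_length (l := sb) (p := fun b => decide (b < a))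
    omega
termination_by sb.length - j

-- the main sweep: the accumulator collects Σ countP, as long as sa is ascending
theorem wc_fold (sb : List Int) (hs : sb.Pairwise (· ≤ ·)) :
    ∀ (sa : List Int), sa.Pairwise (· ≤ ·) → ∀ (c : Int) (j : Nat),
      (∀ a ∈ sa, j ≤ sb.countP (fun b => decide (b < a))) →
      ((sa.foldl (fun (st : Int × Nat) a =>
          let j := wcAdvance sb a st.2
          (st.1 + (j : Int), j)) (c, j)).1
        = c + (sa.map (fun a => ((sb.countP (fun b => decide (b < a)) : Nat) : Int))).sum) := by
  intro sa
  induction sa with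
  | nil => intro _ c j _; simp
  | cons a t ih =>
    intro hsa c j hj
    have hadv : wcAdvance sb a j = sb.countP (fun b => decide (b < a)) :=
      wc_advance_eq sb hs a j (hj a List.mem_cons_self)
    have hmono : ∀ a' ∈ t, sb.countP (fun b => decide (b < a))
        ≤ sb.countP (fun b => decide (b < a')) := by
      intro a' ha'
      apply List.countP_mono_left
      intro b _ hb
      have haa' : a ≤ a' := List.rel_of_pairwise_cons hsa ha'
      simp only [decide_eq_true_eq] at hb ⊢
      omega
    simp only [List.foldl_cons, hadv]
    rw [ih (List.pairwise_cons.1 hsa).2 _ _ hmono]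
    simp
    ring

theorem wcB_eq_canon (a_dice b_dice : List Int) :
    wining_case_alt a_dice b_dice = wcCanon a_dice b_dice := by
  unfold wining_case_alt wcCanon
  have hsb : (PySem.List.sorted b_dice (fun x => x) false).Pairwise (· ≤ ·) :=
    PySem.List.sorted_pairwise b_dice (fun x => x)
  have hsa : (PySem.List.sorted a_dice (fun x => x) false).Pairwise (· ≤ ·) :=
    PySem.List.sorted_pairwise a_dice (fun x => x)
  rw [wc_fold _ hsb _ hsa 0 0 (fun a _ => Nat.zero_le _)]
  have hperm : (PySem.List.sorted b_dice (fun x => x) false).Perm b_dice :=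
    PySem.List.sorted_perm b_dice (fun x => x) false
  have hcnt : ∀ a : Int, (PySem.List.sorted b_dice (fun x => x) false).countP
      (fun b => decide (b < a)) = b_dice.countP (fun b => decide (b < a)) :=
    fun a => hperm.countP_eq _
  have hmap : ((PySem.List.sorted a_dice (fun x => x) false).map
        (fun a => (((PySem.List.sorted b_dice (fun x => x) false).countP
          (fun b => decide (b < a)) : Nat) : Int))).Perm
      (a_dice.map (fun a => ((b_dice.countP (fun b => decide (b < a)) : Nat) : Int))) := by
    have := (PySem.List.sorted_perm a_dice (fun x => x) false).map
      (fun a => ((b_dice.countP (fun b => decide (b < a)) : Nat) : Int))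
    simpa [hcnt] using this
  rw [hmap.sum_eq]
  simp

-- ===== VERDICT (by name: the statement is the Claim_ definition above) =====
theorem wining_case_spec : Claim_equal_wining_case := by
  intro a b _
  unfold Spec_wining_case
  rw [wcA_eq_canon, wcB_eq_canon]
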